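-- pv_equiv track=rewrite | github.com/pytorch/pytorch | memory_allocator/profile_mine.py | greedy_by_size_with_first_gap
-- ===== SOURCE A (Python) =====
-- def intersect(xs, ys):
--     return max(xs[1], ys[1]) - min(xs[0], ys[0]) - (xs[1] - xs[0]) - (ys[1] - ys[0])
--
-- def intersect_lvr(xs, ys):
--     return intersect(xs, ys) <= 0
--
-- def find_first_gap(record, ordered_allocs):
--     (begin_t, end_t), size_t = record
--     best_gap = float("inf")
--     best_offset = None
--     prev_offset = 0
--
--     for (begin_x, end_x), (offset_x, size_x) in ordered_allocs:
--         if not intersect_lvr((begin_x, end_x), (begin_t, end_t)):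
--             continue
--
--         gap = offset_x - prev_offset
--         if size_t <= gap < best_gap:
--             best_offset = prev_offset
--             break
--
--         prev_offset = max(prev_offset, offset_x + size_x)
--
--     if best_offset is None:
--         best_offset = prev_offset
--     return best_offset
--
-- def greedy_by_size_with_first_gap(ordered_records):
--     ordered_records.sort(key=lambda x: -x[1])
--     ordered_allocs = []
--     inorder_of_decision_allocs = []
--     total_consumption = 0
--     for record in ordered_records:
--         best_offset = find_first_gap(record, ordered_allocs)
--
--         (begin_t, end_t), size_t = record
--         total_consumption = max(total_consumption, best_offset + size_t)
--
--         inorder_of_decision_allocs.append(((begin_t, end_t), (best_offset, size_t)))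
--         ordered_allocs.append(((begin_t, end_t), (best_offset, size_t)))
--         ordered_allocs.sort(key=lambda x: x[1][0])
--
--     return inorder_of_decision_allocs, total_consumption
-- ===== SOURCE B (Python) =====
-- def _find_first_gap_merged(record, ordered_allocs):
--     (begin_t, end_t), size_t = record
--     # occupied [offset, offset+size) intervals of the time-overlapping placed allocs
--     occupied = [
--         (off, off + sz)
--         for (b, e), (off, sz) in ordered_allocs
--         if max(e, end_t) - min(b, begin_t) - (e - b) - (end_t - begin_t) <= 0
--     ]
--     occupied.sort(key=lambda p: p[0])
--     # merge into maximal occupied segments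
--     segments = []
--     for s, e in occupied:
--         if segments and s <= segments[-1][1]:
--             segments[-1] = (segments[-1][0], max(segments[-1][1], e))
--         else:
--             segments.append((s, e))
--     # walk the gaps: before, between and after the segments
--     offset = 0
--     for s, e in segments:
--         if s - offset >= size_t:
--             return offset
--         offset = max(offset, e)
--     return offset
--
--
-- def greedy_by_size_with_first_gap(ordered_records):
--     ordered_records.sort(key=lambda x: -x[1])
--     ordered_allocs = []
--     inorder_of_decision_allocs = []
--     total_consumption = 0
--     for (begin_t, end_t), size_t in ordered_records:
--         offset = _find_first_gap_merged(((begin_t, end_t), size_t), ordered_allocs)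
--         total_consumption = max(total_consumption, offset + size_t)
--         alloc = ((begin_t, end_t), (offset, size_t))
--         inorder_of_decision_allocs.append(alloc)
--         i = 0
--         while i < len(ordered_allocs) and ordered_allocs[i][1][0] <= offset:
--             i += 1
--         ordered_allocs.insert(i, alloc)
--     return inorder_of_decision_allocs, total_consumption
-- ===== Notes on version B (the rewrite author's own statement) =====
-- stated objective: alternative
-- what changed: find_first_gap is rewritten as an explicit pipeline - filter the time-overlapping allocs, sort their [offset, offset+size) intervals, merge them into maximal occupied segments, then walk the gaps before/between/after the segments - replacing A's inline running-frontier scan with early break, and the offset-sorted alloc list is maintained by a linear insertion instead of re-sorting the whole list every iteration.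
import Mathlib
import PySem

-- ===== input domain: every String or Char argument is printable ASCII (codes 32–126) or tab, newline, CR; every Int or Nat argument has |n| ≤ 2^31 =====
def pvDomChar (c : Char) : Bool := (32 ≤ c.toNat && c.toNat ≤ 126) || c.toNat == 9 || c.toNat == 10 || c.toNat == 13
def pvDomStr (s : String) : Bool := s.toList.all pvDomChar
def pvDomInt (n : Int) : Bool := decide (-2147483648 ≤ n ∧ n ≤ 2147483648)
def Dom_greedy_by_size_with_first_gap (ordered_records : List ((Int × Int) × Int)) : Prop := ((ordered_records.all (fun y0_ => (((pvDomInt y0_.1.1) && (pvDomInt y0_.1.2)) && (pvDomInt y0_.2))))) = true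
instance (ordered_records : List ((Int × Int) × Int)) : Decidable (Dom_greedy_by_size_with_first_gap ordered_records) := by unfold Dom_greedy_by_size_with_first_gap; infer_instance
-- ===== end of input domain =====

-- B replaces A's inline running-frontier scan in find_first_gap by a filter/sort/merge-intervals/gap-walk
-- pipeline and maintains the offset-sorted alloc list by a linear insertion instead of re-sorting it each
-- iteration (objective: alternative decomposition; A also mutates ordered_records in place by sorting it,
-- B performs the same mutation; the theorems below are about the return value).

-- ===== PORT A =====
def pvIntersect (xs ys : Int × Int) : Int :=
  max xs.2 ys.2 - min xs.1 ys.1 - (xs.2 - xs.1) - (ys.2 - ys.1)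

def pvIntersectLvr (xs ys : Int × Int) : Bool := pvIntersect xs ys ≤ 0

-- A's loop: best_gap stays inf (it breaks right after a hit), so `size_t <= gap < best_gap` is `size_t ≤ gap`,
-- and `best_offset = prev_offset; break` / the final `if best_offset is None` both return the current prev.
def pvFindLoop (t : Int × Int) (size_t : Int) :
    List ((Int × Int) × (Int × Int)) → Int → Int
  | [], prev => prev
  | a :: rest, prev =>
    if ¬ (pvIntersectLvr a.1 t = true) then pvFindLoop t size_t rest prev
    else if size_t ≤ a.2.1 - prev then prev
    else pvFindLoop t size_t rest (max prev (a.2.1 + a.2.2))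

def pvFindFirstGap (record : (Int × Int) × Int) (ordered_allocs : List ((Int × Int) × (Int × Int))) : Int :=
  pvFindLoop record.1 record.2 ordered_allocs 0

def pvStepA (st : List ((Int × Int) × (Int × Int)) × List ((Int × Int) × (Int × Int)) × Int)
    (record : (Int × Int) × Int) :
    List ((Int × Int) × (Int × Int)) × List ((Int × Int) × (Int × Int)) × Int :=
  let best := pvFindFirstGap record st.1
  ( PySem.List.sorted (st.1 ++ [(record.1, (best, record.2))]) (fun x => x.2.1) false,
    st.2.1 ++ [(record.1, (best, record.2))],
    max st.2.2 (best + record.2) )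

def greedy_by_size_with_first_gap (ordered_records : List ((Int × Int) × Int)) :
    (List ((Int × Int) × (Int × Int))) × Int :=
  let recs := PySem.List.sorted ordered_records (fun x => -x.2) false
  let st := recs.foldl pvStepA ([], [], 0)
  (st.2.1, st.2.2)

-- ===== PORT B =====
-- merge loop body: `if segments and s <= segments[-1][1]: segments[-1] = (…)` else append
def pvMergeStep (segs : List (Int × Int)) (p : Int × Int) : List (Int × Int) :=
  match segs.getLast? with
  | some last => if p.1 ≤ last.2 then segs.dropLast ++ [(last.1, max last.2 p.2)] else segs ++ [p]
  | none => segs ++ [p]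

-- gap walk with early return
def pvGapWalk (size_t : Int) : List (Int × Int) → Int → Int
  | [], off => off
  | p :: rest, off => if size_t ≤ p.1 - off then off else pvGapWalk size_t rest (max off p.2)

def pvFindFirstGapMerged (record : (Int × Int) × Int)
    (ordered_allocs : List ((Int × Int) × (Int × Int))) : Int :=
  let occupied := PySem.List.sorted
    ((ordered_allocs.filter (fun a => pvIntersectLvr a.1 record.1)).map
      (fun a => (a.2.1, a.2.1 + a.2.2))) (fun p => p.1) false
  let segments := occupied.foldl pvMergeStep []
  pvGapWalk record.2 segments 0

-- `while i < len(...) and allocs[i][1][0] <= offset: i += 1; allocs.insert(i, alloc)` as structural recursion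
def pvInsertAlloc (x : (Int × Int) × (Int × Int)) :
    List ((Int × Int) × (Int × Int)) → List ((Int × Int) × (Int × Int))
  | [] => [x]
  | y :: ys => if y.2.1 ≤ x.2.1 then y :: pvInsertAlloc x ys else x :: y :: ys

def pvStepB (st : List ((Int × Int) × (Int × Int)) × List ((Int × Int) × (Int × Int)) × Int)
    (record : (Int × Int) × Int) :
    List ((Int × Int) × (Int × Int)) × List ((Int × Int) × (Int × Int)) × Int :=
  let off := pvFindFirstGapMerged record st.1
  ( pvInsertAlloc (record.1, (off, record.2)) st.1,
    st.2.1 ++ [(record.1, (off, record.2))],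
    max st.2.2 (off + record.2) )

def greedy_by_size_with_first_gap_alt (ordered_records : List ((Int × Int) × Int)) :
    (List ((Int × Int) × (Int × Int))) × Int :=
  let recs := PySem.List.sorted ordered_records (fun x => -x.2) false
  let st := recs.foldl pvStepB ([], [], 0)
  (st.2.1, st.2.2)

-- ===== PRECONDITION & SPEC =====
def Spec_greedy_by_size_with_first_gap (ordered_records : List ((Int × Int) × Int)) (out : (List ((Int × Int) × (Int × Int))) × Int) : Prop := out = greedy_by_size_with_first_gap_alt ordered_records
instance (ordered_records : List ((Int × Int) × Int)) (out : (List ((Int × Int) × (Int × Int))) × Int) : Decidable (Spec_greedy_by_size_with_first_gap ordered_records out) := by unfold Spec_greedy_by_size_with_first_gap; infer_instance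

-- ===== CLAIM (what is proved, stated in full; the proofs are below) =====
def Claim_equal_greedy_by_size_with_first_gap : Prop := ∀ (ordered_records : List ((Int × Int) × Int)), Dom_greedy_by_size_with_first_gap ordered_records → Spec_greedy_by_size_with_first_gap ordered_records (greedy_by_size_with_first_gap ordered_records)

-- ===== LEMMAS AND PROOFS =====

-- proof-side recursive form of B's merge loop
def pvMergeGo (cs ce : Int) : List (Int × Int) → List (Int × Int)
  | [] => [(cs, ce)]
  | p :: rest => if p.1 ≤ ce then pvMergeGo cs (max ce p.2) rest else (cs, ce) :: pvMergeGo p.1 p.2 rest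

lemma pvMergeStep_foldl (rest : List (Int × Int)) :
    ∀ (acc : List (Int × Int)) (cs ce : Int),
      rest.foldl pvMergeStep (acc ++ [(cs, ce)]) = acc ++ pvMergeGo cs ce rest := by
  induction rest with
  | nil => intro acc cs ce; simp [pvMergeGo]
  | cons p rest ih =>
    intro acc cs ce
    simp only [List.foldl_cons, pvMergeStep, List.getLast?_concat, pvMergeGo]
    by_cases h : p.1 ≤ ce
    · simp [h, ih]
    · have : (acc ++ [(cs, ce)]) ++ [p] = (acc ++ [(cs, ce)]) ++ [(p.1, p.2)] := by simp
      simp only [h, this]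
      rw [List.append_assoc] at this ⊢
      simpa using ih (acc ++ [(cs, ce)]) p.1 p.2

lemma pvMerge_cons (p : Int × Int) (rest : List (Int × Int)) :
    (p :: rest).foldl pvMergeStep [] = pvMergeGo p.1 p.2 rest := by
  have h0 : pvMergeStep [] p = [] ++ [(p.1, p.2)] := by simp [pvMergeStep]
  simp only [List.foldl_cons, h0]
  simpa using pvMergeStep_foldl rest [] p.1 p.2

-- key lemma: for a positive request the gap walk over the merged segments is the raw frontier scan
lemma pvGapWalk_mergeGo (s : Int) (hs : 0 < s) (r : List (Int × Int)) :
    ∀ (cs ce prev : Int),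
      pvGapWalk s (pvMergeGo cs ce r) prev =
        if s ≤ cs - prev then prev else pvGapWalk s r (max prev ce) := by
  induction r with
  | nil => intro cs ce prev; simp [pvMergeGo, pvGapWalk]
  | cons p rest ih =>
    intro cs ce prev
    simp only [pvMergeGo]
    by_cases h : p.1 ≤ ce
    · simp only [if_pos h, ih]
      by_cases h1 : s ≤ cs - prev
      · simp [h1]
      · have h2 : ¬ s ≤ p.1 - max prev ce := by
          have : p.1 - max prev ce ≤ 0 := by
            have := le_max_right prev ce; omega
          omega
        simp [h1, pvGapWalk, h2, max_assoc]
    · simp only [if_neg h, pvGapWalk, ih]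

-- monotonicity: A's loop never returns below its running frontier
lemma pvFindLoop_ge (t : Int × Int) (s : Int) (l : List ((Int × Int) × (Int × Int))) :
    ∀ prev, prev ≤ pvFindLoop t s l prev := by
  induction l with
  | nil => intro prev; simp [pvFindLoop]
  | cons a rest ih =>
    intro prev
    simp only [pvFindLoop]
    by_cases h1 : pvIntersectLvr a.1 t = true
    · by_cases h2 : s ≤ a.2.1 - prev
      · simp [h1, h2]
      · simp only [h1, not_true, if_false, h2]
        calc prev ≤ max prev (a.2.1 + a.2.2) := le_max_left _ _
          _ ≤ _ := ih _
    · simpa [h1] using ih prev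

-- A's loop is the gap walk over the filtered occupied intervals
lemma pvFindLoop_eq_gapWalk (t : Int × Int) (s : Int) (l : List ((Int × Int) × (Int × Int))) :
    ∀ prev, pvFindLoop t s l prev =
      pvGapWalk s ((l.filter (fun a => pvIntersectLvr a.1 t)).map
        (fun a => (a.2.1, a.2.1 + a.2.2))) prev := by
  induction l with
  | nil => intro prev; simp [pvFindLoop, pvGapWalk]
  | cons a rest ih =>
    intro prev
    simp only [pvFindLoop, List.filter_cons]
    by_cases h1 : pvIntersectLvr a.1 t = true
    · simp only [h1, if_true, not_true, List.map_cons, pvGapWalk]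
      by_cases h2 : s ≤ a.2.1 - prev
      · simp [h2]
      · simp [h2, ih]
    · simp [h1, ih prev]

-- head of pvMergeGo starts at cs
lemma pvMergeGo_head (r : List (Int × Int)) :
    ∀ cs ce, ∃ ce' t, pvMergeGo cs ce r = (cs, ce') :: t := by
  induction r with
  | nil => intro cs ce; exact ⟨ce, [], rfl⟩
  | cons p rest ih =>
    intro cs ce
    simp only [pvMergeGo]
    by_cases h : p.1 ≤ ce
    · simpa [h] using ih cs (max ce p.2)
    · exact ⟨ce, pvMergeGo p.1 p.2 rest, by simp [h]⟩

-- the two find_first_gap implementations agree on an offset-sorted alloc list with nonnegative offsets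
lemma find_eq (record : (Int × Int) × Int) (allocs : List ((Int × Int) × (Int × Int)))
    (hp : allocs.Pairwise (fun a b => a.2.1 ≤ b.2.1))
    (hn : ∀ a ∈ allocs, 0 ≤ a.2.1) :
    pvFindFirstGap record allocs = pvFindFirstGapMerged record allocs := by
  have hFp : (allocs.filter (fun a => pvIntersectLvr a.1 record.1)).Pairwise
      (fun a b => a.2.1 ≤ b.2.1) := hp.filter _
  set F := (allocs.filter (fun a => pvIntersectLvr a.1 record.1)).map
      (fun a => (a.2.1, a.2.1 + a.2.2)) with hF
  have hFsorted : F.Pairwise (fun p q : Int × Int => p.1 ≤ q.1) := by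
    rw [hF, List.pairwise_map]; exact hFp
  have hsort : PySem.List.sorted F (fun p => p.1) false = F :=
    PySem.List.sorted_eq_self_of_pairwise F _ hFsorted
  have hA : pvFindFirstGap record allocs = pvGapWalk record.2 F 0 := by
    simpa [pvFindFirstGap, hF] using pvFindLoop_eq_gapWalk record.1 record.2 allocs 0
  have hB : pvFindFirstGapMerged record allocs =
      pvGapWalk record.2 (F.foldl pvMergeStep []) 0 := by
    simp only [pvFindFirstGapMerged]
    rw [← hF, hsort]
  rw [hA, hB]
  cases hFl : F with
  | nil => rfl
  | cons p rest =>
    rw [pvMerge_cons]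
    by_cases hs : 0 < record.2
    · rw [pvGapWalk_mergeGo record.2 hs rest p.1 p.2 0]
      simp [pvGapWalk]
    · -- size_t ≤ 0: both return 0 at the first occupied interval, whose start is ≥ 0
      have hp0 : 0 ≤ p.1 := by
        have hmem : p ∈ F := by rw [hFl]; exact List.mem_cons_self
        rw [hF] at hmem
        obtain ⟨a, ha, rfl⟩ := List.mem_map.1 hmem
        exact hn a (List.mem_of_mem_filter ha)
      have hcond : record.2 ≤ p.1 := by omega
      obtain ⟨ce', t, hMG⟩ := pvMergeGo_head rest p.1 p.2
      rw [hMG]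
      simp [pvGapWalk, hcond]

-- the linear insertion is PySem's stable insertion step
lemma pvInsertAlloc_eq_insertBy (x : (Int × Int) × (Int × Int)) :
    ∀ l, pvInsertAlloc x l =
      PySem.List.insertBy (fun a b => decide ((a.2.1 : Int) < b.2.1)) x l := by
  intro l
  induction l with
  | nil => rfl
  | cons y ys ih =>
    simp only [pvInsertAlloc, PySem.List.insertBy]
    by_cases h : y.2.1 ≤ x.2.1
    · have : ¬ (x.2.1 < y.2.1) := not_lt.2 h
      simp [h, this, ih]
    · have : x.2.1 < y.2.1 := not_le.1 h
      simp [h, this]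

-- re-sorting a sorted list with one element appended is the stable linear insertion of that element
lemma sorted_append_eq_insert (l : List ((Int × Int) × (Int × Int)))
    (x : (Int × Int) × (Int × Int)) (hp : l.Pairwise (fun a b => a.2.1 ≤ b.2.1)) :
    PySem.List.sorted (l ++ [x]) (fun a => a.2.1) false = pvInsertAlloc x l := by
  rw [PySem.List.sorted_eq_foldl_insertBy, List.foldl_append]
  have h1 : l.foldl (fun acc a =>
      PySem.List.insertBy (fun a b => decide ((a.2.1 : Int) < b.2.1)) a acc) [] = l := by
    rw [← PySem.List.sorted_eq_foldl_insertBy l (fun a => a.2.1)]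
    exact PySem.List.sorted_eq_self_of_pairwise l _ hp
  rw [h1, List.foldl_cons, List.foldl_nil, pvInsertAlloc_eq_insertBy]

lemma outer_loop_eq (recs : List ((Int × Int) × Int)) :
    ∀ (st : List ((Int × Int) × (Int × Int)) × List ((Int × Int) × (Int × Int)) × Int),
      st.1.Pairwise (fun a b => a.2.1 ≤ b.2.1) → (∀ a ∈ st.1, 0 ≤ a.2.1) →
      recs.foldl pvStepA st = recs.foldl pvStepB st := by
  induction recs with
  | nil => intro st _ _; rfl
  | cons r rest ih =>
    intro st hp hn
    have hfind : pvFindFirstGap r st.1 = pvFindFirstGapMerged r st.1 := find_eq r st.1 hp hn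
    have hstep : pvStepA st r = pvStepB st r := by
      simp only [pvStepA, pvStepB, ← hfind]
      rw [sorted_append_eq_insert st.1 _ hp]
    have hbest : 0 ≤ pvFindFirstGap r st.1 := pvFindLoop_ge r.1 r.2 st.1 0
    have hp' : (pvStepA st r).1.Pairwise (fun a b => a.2.1 ≤ b.2.1) := by
      simp only [pvStepA]
      exact PySem.List.sorted_pairwise _ _
    have hn' : ∀ a ∈ (pvStepA st r).1, 0 ≤ a.2.1 := by
      intro a ha
      simp only [pvStepA] at ha
      rw [PySem.List.mem_sorted] at ha
      rcases List.mem_append.1 ha with h | h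
      · exact hn a h
      · simp at h; subst h; exact hbest
    simp only [List.foldl_cons]
    rw [← hstep] at *
    rw [ih (pvStepA st r) hp' hn', hstep]

-- ===== VERDICT (by name: the statement is the Claim_ definition above) =====
theorem greedy_by_size_with_first_gap_spec : Claim_equal_greedy_by_size_with_first_gap := by
  intro ordered_records _
  show greedy_by_size_with_first_gap ordered_records = _
  simp only [greedy_by_size_with_first_gap, greedy_by_size_with_first_gap_alt]
  rw [outer_loop_eq _ ([], [], 0) (by simp) (by simp)]
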